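-- pv_equiv track=rewrite | github.com/EvieQ01/DirectedInfo-GAIL | IL/plot_utils.py | get_multiple_traj_idx_from_goal_list
-- ===== SOURCE A (Python) =====
-- def get_multiple_traj_idx_from_goal_list(goal_list):
--     last_goal_idx = 0
--     goal_idx_list = []
--     while last_goal_idx < len(goal_list):
--         curr_goal_idx = last_goal_idx
--         while curr_goal_idx < len(goal_list):
--             if goal_list[last_goal_idx] == goal_list[curr_goal_idx]:
--                 curr_goal_idx = curr_goal_idx + 1
--             else:
--                 break
--         # we have one trajectory
--         goal_idx_list.append((last_goal_idx, curr_goal_idx))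
--         last_goal_idx = curr_goal_idx
--
--     return goal_idx_list
-- ===== SOURCE B (Python) =====
-- def get_multiple_traj_idx_from_goal_list(goal_list):
--     if not goal_list:
--         return []
--     result = []
--     start = 0
--     for i in range(1, len(goal_list)):
--         if goal_list[i] != goal_list[i - 1]:
--             result.append((start, i))
--             start = i
--     result.append((start, len(goal_list)))
--     return result
-- ===== Notes on version B (the rewrite author's own statement) =====
-- stated objective: simpler
-- what changed: Replaced the nested while-loops (inner scan per run against goal_list[last]) by one flat for-loop that compares each element with its predecessor and flushes a run at each change point, with a final flush.
import Mathlib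
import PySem

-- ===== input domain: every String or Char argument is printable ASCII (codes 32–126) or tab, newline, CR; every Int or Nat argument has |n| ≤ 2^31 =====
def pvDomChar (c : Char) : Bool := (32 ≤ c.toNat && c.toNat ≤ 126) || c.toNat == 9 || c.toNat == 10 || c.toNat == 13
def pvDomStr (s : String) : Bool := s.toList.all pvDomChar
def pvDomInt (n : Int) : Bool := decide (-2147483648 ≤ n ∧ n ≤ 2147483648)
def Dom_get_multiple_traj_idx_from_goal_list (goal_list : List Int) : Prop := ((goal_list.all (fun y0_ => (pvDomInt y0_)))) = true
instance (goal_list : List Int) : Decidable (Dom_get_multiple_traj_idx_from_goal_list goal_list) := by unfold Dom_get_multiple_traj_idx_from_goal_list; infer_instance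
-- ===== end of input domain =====

-- B replaces A's nested while-loops by one flat loop comparing each element with its
-- predecessor (objective: simpler). Equivalence is proved on all inputs (both total).
-- The while-loops are transcribed as fuel recursion; fuel = length is provably
-- sufficient (each step guarded by an index < length strictly raises that index),
-- and on exhaustion the returned state equals the loop-exit state.

-- ===== PORT A =====
-- inner while loop: advance curr while goal_list[last] == goal_list[curr]
def pvInnerA (goal : List Int) (last : Nat) : Nat → Nat → Nat
  | 0, curr => curr
  | fuel + 1, curr =>
    if curr < goal.length then
      if goal.getD last 0 = goal.getD curr 0 then pvInnerA goal last fuel (curr + 1) else curr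
    else curr

-- outer while loop
def pvOuterA (goal : List Int) : Nat → Nat → List (Int × Int) → List (Int × Int)
  | 0, _, acc => acc
  | fuel + 1, last, acc =>
    if last < goal.length then
      let curr := pvInnerA goal last goal.length last
      pvOuterA goal fuel curr (acc ++ [((last : Int), (curr : Int))])
    else acc

def get_multiple_traj_idx_from_goal_list (goal_list : List Int) : List (Int × Int) :=
  pvOuterA goal_list goal_list.length 0 []

-- ===== PORT B =====
-- flat loop: for i in range(1, n): if goal[i] != goal[i-1] flush (start, i)
def pvLoopB (goal : List Int) (n : Nat) : Nat → Nat → Nat → List (Int × Int) → List (Int × Int) × Nat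
  | 0, start, _, acc => (acc, start)
  | fuel + 1, start, i, acc =>
    if i < n then
      if goal.getD i 0 ≠ goal.getD (i - 1) 0 then
        pvLoopB goal n fuel i (i + 1) (acc ++ [((start : Int), (i : Int))])
      else
        pvLoopB goal n fuel start (i + 1) acc
    else (acc, start)

def get_multiple_traj_idx_from_goal_list_alt (goal_list : List Int) : List (Int × Int) :=
  if goal_list = [] then []
  else
    let r := pvLoopB goal_list goal_list.length goal_list.length 0 1 []
    r.1 ++ [((r.2 : Int), (goal_list.length : Int))]

-- ===== PRECONDITION & SPEC =====
def Spec_get_multiple_traj_idx_from_goal_list (goal_list : List Int) (out : List (Int × Int)) : Prop := out = get_multiple_traj_idx_from_goal_list_alt goal_list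
instance (goal_list : List Int) (out : List (Int × Int)) : Decidable (Spec_get_multiple_traj_idx_from_goal_list goal_list out) := by unfold Spec_get_multiple_traj_idx_from_goal_list; infer_instance

-- ===== CLAIM (what is proved, stated in full; the proofs are below) =====
def Claim_equal_get_multiple_traj_idx_from_goal_list : Prop := ∀ (goal_list : List Int), Dom_get_multiple_traj_idx_from_goal_list goal_list → Spec_get_multiple_traj_idx_from_goal_list goal_list (get_multiple_traj_idx_from_goal_list goal_list)

-- ===== LEMMAS AND PROOFS =====

-- the inner while loop, started at a stopping index, returns it (any fuel)
theorem pvInnerA_stop (goal : List Int) (start i fuel : Nat)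
    (hstop : i = goal.length ∨ goal.getD i 0 ≠ goal.getD start 0) :
    pvInnerA goal start fuel i = i := by
  cases fuel with
  | zero => rfl
  | succ fuel =>
    rw [pvInnerA]
    rcases hstop with h | h
    · simp [h]
    · by_cases hlt : i < goal.length
      · simp only [if_pos hlt]
        rw [if_neg]
        intro he
        exact h he.symm
      · simp [hlt]

-- the inner while loop stops exactly at the first index i where the run breaks (or at n)
theorem pvInnerA_eval (goal : List Int) (start i : Nat) (hin : i ≤ goal.length)
    (hstop : i = goal.length ∨ goal.getD i 0 ≠ goal.getD start 0) :
    ∀ fuel curr, i - curr ≤ fuel → curr ≤ i →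
      (∀ j, curr ≤ j → j < i → goal.getD j 0 = goal.getD start 0) →
      pvInnerA goal start fuel curr = i := by
  intro fuel
  induction fuel with
  | zero =>
    intro curr hk hci _
    have hc : curr = i := by omega
    subst hc
    rfl
  | succ fuel ih =>
    intro curr hk hci hrun
    by_cases hc : curr = i
    · subst hc
      exact pvInnerA_stop goal start curr (fuel + 1) hstop
    · have hlt : curr < i := by omega
      have hcl : curr < goal.length := by omega
      have heq : goal.getD start 0 = goal.getD curr 0 := (hrun curr le_rfl hlt).symm
      rw [pvInnerA]
      simp only [if_pos hcl, if_pos heq]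
      exact ih (curr + 1) (by omega) (by omega) (fun j hj1 hj2 => hrun j (by omega) hj2)

-- the outer loop with an out-of-range index returns the accumulator (any fuel)
theorem pvOuterA_stop (goal : List Int) (fuel last : Nat) (acc : List (Int × Int))
    (h : ¬ last < goal.length) : pvOuterA goal fuel last acc = acc := by
  cases fuel with
  | zero => rfl
  | succ fuel => rw [pvOuterA]; simp [h]

-- main bridge: B's flat loop agrees with A's outer loop, given the current run is unbroken
theorem pvLoopB_eq_outer (goal : List Int) :
    ∀ fuelB i start acc fuelA, goal.length - i ≤ fuelB → start < i → i ≤ goal.length →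
      goal.length - start ≤ fuelA →
      (∀ j, start ≤ j → j < i → goal.getD j 0 = goal.getD start 0) →
      (pvLoopB goal goal.length fuelB start i acc).1 ++
        [(((pvLoopB goal goal.length fuelB start i acc).2 : Int), (goal.length : Int))] =
      pvOuterA goal fuelA start acc := by
  intro fuelB
  induction fuelB with
  | zero =>
    intro i start acc fuelA hk hsi hin hfa hrun
    have hi : i = goal.length := by omega
    obtain ⟨fA, rfl⟩ : ∃ fA, fuelA = fA + 1 := ⟨fuelA - 1, by omega⟩
    have hinner : pvInnerA goal start goal.length start = goal.length :=
      pvInnerA_eval goal start goal.length le_rfl (Or.inl rfl) goal.length start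
        (by omega) (by omega) (fun j h1 h2 => hrun j h1 (by omega))
    rw [pvOuterA]
    simp only [if_pos (show start < goal.length by omega), hinner]
    rw [pvOuterA_stop goal fA goal.length _ (by omega)]
    rfl
  | succ fuelB ih =>
    intro i start acc fuelA hk hsi hin hfa hrun
    by_cases hn : i < goal.length
    · rw [pvLoopB]
      simp only [if_pos hn]
      by_cases hne : goal.getD i 0 ≠ goal.getD (i - 1) 0
      · simp only [if_pos hne]
        have hprev : goal.getD (i - 1) 0 = goal.getD start 0 := hrun (i - 1) (by omega) (by omega)
        have hbrk : goal.getD i 0 ≠ goal.getD start 0 := by rw [← hprev]; exact hne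
        have hinner : pvInnerA goal start goal.length start = i :=
          pvInnerA_eval goal start i (by omega) (Or.inr hbrk) goal.length start
            (by omega) (by omega) hrun
        obtain ⟨fA, rfl⟩ : ∃ fA, fuelA = fA + 1 := ⟨fuelA - 1, by omega⟩
        rw [pvOuterA]
        simp only [if_pos (show start < goal.length by omega), hinner]
        exact ih (i + 1) i (acc ++ [((start : Int), (i : Int))]) fA
          (by omega) (by omega) (by omega) (by omega)
          (fun j h1 h2 => by
            have hji : j = i := by omega
            rw [hji])
      · simp only [if_neg hne]
        have hne' := of_not_not hne
        exact ih (i + 1) start acc fuelA (by omega) (by omega) (by omega) (by omega)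
          (fun j h1 h2 => by
            by_cases hj : j < i
            · exact hrun j h1 hj
            · have hji : j = i := by omega
              rw [hji, hne']
              exact hrun (i - 1) (by omega) (by omega))
    · -- i = goal.length : flush the pending run; A's inner loop runs to the end
      rw [pvLoopB]
      simp only [if_neg hn]
      have hinner : pvInnerA goal start goal.length start = goal.length :=
        pvInnerA_eval goal start goal.length le_rfl (Or.inl rfl) goal.length start
          (by omega) (by omega) (fun j h1 h2 => hrun j h1 (by omega))
      obtain ⟨fA, rfl⟩ : ∃ fA, fuelA = fA + 1 := ⟨fuelA - 1, by omega⟩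
      rw [pvOuterA]
      simp only [if_pos (show start < goal.length by omega), hinner]
      rw [pvOuterA_stop goal fA goal.length _ (by omega)]

-- ===== VERDICT (by name: the statement is the Claim_ definition above) =====
theorem get_multiple_traj_idx_from_goal_list_spec : Claim_equal_get_multiple_traj_idx_from_goal_list := by
  intro goal_list _
  unfold Spec_get_multiple_traj_idx_from_goal_list
  unfold get_multiple_traj_idx_from_goal_list get_multiple_traj_idx_from_goal_list_alt
  by_cases hg : goal_list = []
  · subst hg
    rfl
  · simp only [if_neg hg]
    have hlen : 0 < goal_list.length := List.length_pos_iff.mpr hg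
    exact (pvLoopB_eq_outer goal_list goal_list.length 1 0 [] goal_list.length
      (by omega) (by omega) (by omega) (by omega)
      (fun j h1 h2 => by
        have hj0 : j = 0 := by omega
        rw [hj0])).symm
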